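-- pv_equiv track=rewrite | github.com/htorodriguez/grainsize_measure | 60_Grainsize_project/DL_functions/DL_helper_functions.py | make_param_list_9
-- ===== SOURCE A (Python) =====
-- def make_param_list_9(l1, l2, l3, l4, l5, l6, l7, l8, l9):
--     """Function to make a list of all possible permutations of several list
--     args: several lists li
--     return: list of lists with all possible permutations
--     """
--     combination_list=[]
--     for i in l1:
--         for j in l2:
--             for k in l3:
--                 for l in l4:
--                     for m in l5:
--                         for n in l6:
--                             for o in l7:
--                                 for p in l8:
--                                     for q in l9:
--                                         combination_list.append((i,j,k,l,m,n,o,p,q))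
--     return(combination_list)
-- ===== SOURCE B (Python) =====
-- def make_param_list_9(l1, l2, l3, l4, l5, l6, l7, l8, l9):
--     """Accumulator-driven product: grow partial tuples one list at a time."""
--     acc = [()]
--     for lst in (l1, l2, l3, l4, l5, l6, l7, l8, l9):
--         acc = [t + (x,) for t in acc for x in lst]
--     return acc
-- ===== Notes on version B (the rewrite author's own statement) =====
-- stated objective: simpler
-- what changed: Replaces nine statically nested for-loops with a single accumulator loop over the sequence of lists, growing partial tuples one coordinate at a time.
import Mathlib
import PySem

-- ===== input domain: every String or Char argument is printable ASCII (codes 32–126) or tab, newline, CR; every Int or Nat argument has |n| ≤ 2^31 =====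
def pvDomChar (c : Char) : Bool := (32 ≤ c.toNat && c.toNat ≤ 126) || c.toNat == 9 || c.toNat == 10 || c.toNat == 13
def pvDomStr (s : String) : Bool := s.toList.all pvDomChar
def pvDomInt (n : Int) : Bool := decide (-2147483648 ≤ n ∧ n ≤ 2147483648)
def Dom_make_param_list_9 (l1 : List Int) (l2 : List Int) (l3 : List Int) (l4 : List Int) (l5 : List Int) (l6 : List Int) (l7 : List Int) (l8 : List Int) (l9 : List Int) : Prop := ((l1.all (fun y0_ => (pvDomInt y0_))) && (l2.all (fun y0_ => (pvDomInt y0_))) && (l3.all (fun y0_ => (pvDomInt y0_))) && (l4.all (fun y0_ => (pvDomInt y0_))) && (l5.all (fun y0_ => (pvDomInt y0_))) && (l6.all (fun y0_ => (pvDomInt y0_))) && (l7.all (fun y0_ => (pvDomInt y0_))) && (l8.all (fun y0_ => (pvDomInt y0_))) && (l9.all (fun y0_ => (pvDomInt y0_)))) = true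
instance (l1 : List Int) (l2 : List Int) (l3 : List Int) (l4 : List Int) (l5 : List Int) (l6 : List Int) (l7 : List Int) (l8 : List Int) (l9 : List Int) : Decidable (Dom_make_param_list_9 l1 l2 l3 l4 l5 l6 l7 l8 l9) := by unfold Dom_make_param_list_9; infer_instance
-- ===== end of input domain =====

-- B replaces A's nine statically nested loops with one accumulator loop over the lists,
-- growing partial tuples one coordinate at a time (objective: simpler decomposition; same output order).

-- ===== PORT A =====
-- Nine nested for-loops appending one 9-tuple at a time to combination_list.
def make_param_list_9 (l1 : List Int) (l2 : List Int) (l3 : List Int) (l4 : List Int) (l5 : List Int) (l6 : List Int) (l7 : List Int) (l8 : List Int) (l9 : List Int) : List (Int × Int × Int × Int × Int × Int × Int × Int × Int) :=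
  l1.foldl (fun acc i =>
    l2.foldl (fun acc j =>
      l3.foldl (fun acc k =>
        l4.foldl (fun acc l =>
          l5.foldl (fun acc m =>
            l6.foldl (fun acc n =>
              l7.foldl (fun acc o =>
                l8.foldl (fun acc p =>
                  l9.foldl (fun acc q => acc ++ [(i,j,k,l,m,n,o,p,q)]) acc)
                acc) acc) acc) acc) acc) acc) acc) []

-- ===== PORT B =====
-- Python's growing tuples t + (x,) are heterogeneous; the port represents a partial tuple
-- as a List Int (exact: same elements, same order) and converts completed 9-element tuples at the end.
def pvStep (acc : List (List Int)) (lst : List Int) : List (List Int) :=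
  acc.flatMap (fun t => lst.map (fun x => t ++ [x]))   -- [t + (x,) for t in acc for x in lst]

def pvToTuple9 (t : List Int) : Int × Int × Int × Int × Int × Int × Int × Int × Int :=
  match t with
  | [a,b,c,d,e,f,g,h,i] => (a,b,c,d,e,f,g,h,i)
  | _ => (0,0,0,0,0,0,0,0,0)

def make_param_list_9_alt (l1 : List Int) (l2 : List Int) (l3 : List Int) (l4 : List Int) (l5 : List Int) (l6 : List Int) (l7 : List Int) (l8 : List Int) (l9 : List Int) : List (Int × Int × Int × Int × Int × Int × Int × Int × Int) :=
  (([l1,l2,l3,l4,l5,l6,l7,l8,l9].foldl pvStep [[]]).map pvToTuple9)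

-- ===== PRECONDITION & SPEC =====
def Spec_make_param_list_9 (l1 : List Int) (l2 : List Int) (l3 : List Int) (l4 : List Int) (l5 : List Int) (l6 : List Int) (l7 : List Int) (l8 : List Int) (l9 : List Int) (out : List (Int × Int × Int × Int × Int × Int × Int × Int × Int)) : Prop := out = make_param_list_9_alt l1 l2 l3 l4 l5 l6 l7 l8 l9
instance (l1 : List Int) (l2 : List Int) (l3 : List Int) (l4 : List Int) (l5 : List Int) (l6 : List Int) (l7 : List Int) (l8 : List Int) (l9 : List Int) (out : List (Int × Int × Int × Int × Int × Int × Int × Int × Int)) : Decidable (Spec_make_param_list_9 l1 l2 l3 l4 l5 l6 l7 l8 l9 out) := by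
  unfold Spec_make_param_list_9
  -- the 9-fold product exceeds default instance search depth: assemble DecidableEq bottom-up
  haveI h2 : DecidableEq (Int × Int) := instDecidableEqProd
  haveI h3 : DecidableEq (Int × Int × Int) := instDecidableEqProd
  haveI h4 : DecidableEq (Int × Int × Int × Int) := instDecidableEqProd
  haveI h5 : DecidableEq (Int × Int × Int × Int × Int) := instDecidableEqProd
  haveI h6 : DecidableEq (Int × Int × Int × Int × Int × Int) := instDecidableEqProd
  haveI h7 : DecidableEq (Int × Int × Int × Int × Int × Int × Int) := instDecidableEqProd
  haveI h8 : DecidableEq (Int × Int × Int × Int × Int × Int × Int × Int) := instDecidableEqProd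
  haveI h9 : DecidableEq (Int × Int × Int × Int × Int × Int × Int × Int × Int) := instDecidableEqProd
  infer_instance

-- ===== CLAIM (what is proved, stated in full; the proofs are below) =====
def Claim_equal_make_param_list_9 : Prop := ∀ (l1 : List Int) (l2 : List Int) (l3 : List Int) (l4 : List Int) (l5 : List Int) (l6 : List Int) (l7 : List Int) (l8 : List Int) (l9 : List Int), Dom_make_param_list_9 l1 l2 l3 l4 l5 l6 l7 l8 l9 → Spec_make_param_list_9 l1 l2 l3 l4 l5 l6 l7 l8 l9 (make_param_list_9 l1 l2 l3 l4 l5 l6 l7 l8 l9)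

-- ===== LEMMAS AND PROOFS =====

-- ===== VERDICT (by name: the statement is the Claim_ definition above) =====
theorem make_param_list_9_spec : Claim_equal_make_param_list_9 := by
  intro l1 l2 l3 l4 l5 l6 l7 l8 l9 _
  unfold Spec_make_param_list_9 make_param_list_9 make_param_list_9_alt
  simp only [PySem.List.foldl_append_singleton_eq_map, PySem.List.foldl_append_eq_flatMap,
    List.foldl_cons, List.foldl_nil, pvStep, List.map_flatMap, List.flatMap_assoc,
    List.flatMap_map, List.map_map, Function.comp_def,
    List.flatMap_cons, List.flatMap_nil, List.append_nil,
    List.cons_append, List.nil_append, pvToTuple9]
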